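-- pv_equiv track=rewrite | github.com/dsi28/DS-Algos | 4-practice-problems/12_permutation.py | permutation_check_2
-- ===== SOURCE A (Python) =====
-- def permutation_check_2(list_1, list_2):
--     if len(list_1) != len(list_2):
--         return False
--     dict_perm = {} # every key should have a value of 2
--     i = 0
--     while i < len(list_1):
--         if list_1[i] != list_2[i]:
--             if list_1[i] not in dict_perm.keys():
--                 dict_perm[list_1[i]] = 1
--             else:
--                 dict_perm[list_1[i]] += 1
--             if list_2[i] not in dict_perm.keys():
--                 dict_perm[list_2[i]] = 1
--             else:
--                 dict_perm[list_2[i]] += 1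
--         i += 1
--     for item in dict_perm.values():
--         if item % 2 != 0:
--             return False
--     return True
-- ===== SOURCE B (Python) =====
-- def _paired(xs):
--     # xs is sorted with even length: every value occurs an even number of
--     # times iff consecutive pairs are equal
--     if not xs:
--         return True
--     if xs[0] != xs[1]:
--         return False
--     return _paired(xs[2:])
--
--
-- def permutation_check_2(list_1, list_2):
--     if len(list_1) != len(list_2):
--         return False
--     diffs = []
--     for a, b in zip(list_1, list_2):
--         if a != b:
--             diffs += [a, b]
--     return _paired(sorted(diffs))
-- ===== Notes on version B (the rewrite author's own statement) =====
-- stated objective: alternative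
-- what changed: Instead of counting occurrences in a dict and scanning the values for odd counts, B collects both elements of every mismatched position into one list, sorts it, and checks recursively that consecutive pairs of the sorted list are equal (sort-then-pair instead of hashing-and-counting).
import Mathlib
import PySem

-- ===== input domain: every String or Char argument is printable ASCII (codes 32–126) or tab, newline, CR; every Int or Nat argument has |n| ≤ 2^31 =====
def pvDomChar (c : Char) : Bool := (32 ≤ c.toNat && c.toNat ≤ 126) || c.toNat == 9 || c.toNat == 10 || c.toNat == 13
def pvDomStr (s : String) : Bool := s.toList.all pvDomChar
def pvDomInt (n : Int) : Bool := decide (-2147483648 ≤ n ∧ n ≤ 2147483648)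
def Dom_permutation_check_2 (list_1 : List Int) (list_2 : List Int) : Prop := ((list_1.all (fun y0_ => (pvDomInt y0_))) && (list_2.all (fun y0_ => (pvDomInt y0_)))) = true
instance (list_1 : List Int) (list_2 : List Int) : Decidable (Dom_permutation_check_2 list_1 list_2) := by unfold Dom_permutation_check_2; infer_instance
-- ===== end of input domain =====

-- B replaces A's count-dict plus odd-value scan by sort-then-pair: collect both elements of
-- every mismatched position, sort, and check consecutive pairs are equal (alternative; O(n log n)).

-- ===== PORT A =====
-- A's two-branch dict update: d[x] = 1 if x not in d else d[x] + 1
def pvBump (d : PySem.Dict Int Int) (x : Int) : PySem.Dict Int Int :=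
  if d.contains x = false then d.insert x 1
  else d.insert x (d.getD x 0 + 1)

def permutation_check_2 (list_1 : List Int) (list_2 : List Int) : Bool :=
  if list_1.length ≠ list_2.length then false
  else
    -- 'while i < len(list_1): … i += 1' as a fold over range(len(list_1)), then
    -- 'for item in dict_perm.values(): if item % 2 != 0: return False / return True'
    ((PySem.List.pyRange 0 (PySem.List.len list_1) 1).foldl
        (fun d i =>
          if PySem.List.pyGetD list_1 i 0 ≠ PySem.List.pyGetD list_2 i 0 then
            pvBump (pvBump d (PySem.List.pyGetD list_1 i 0)) (PySem.List.pyGetD list_2 i 0)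
          else d)
        PySem.Dict.empty).values.all (fun item => PySem.Int.mod item 2 == 0)

-- ===== PORT B =====
-- B's recursive helper _paired: xs[1] would raise IndexError on a singleton — that branch is
-- unreachable (the list it is applied to always has even length); it is rendered as 'false'.
def pvPaired : List Int → Bool
  | [] => true
  | [_] => false
  | a :: b :: t => a == b && pvPaired t

def permutation_check_2_alt (list_1 : List Int) (list_2 : List Int) : Bool :=
  if list_1.length ≠ list_2.length then false
  else
    -- 'for a, b in zip(...): if a != b: diffs += [a, b]', then '_paired(sorted(diffs))'
    pvPaired (PySem.List.sorted
      ((list_1.zip list_2).foldl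
        (fun acc p => if p.1 ≠ p.2 then acc ++ [p.1, p.2] else acc) [])
      (fun x => x) false)

-- ===== PRECONDITION & SPEC =====
def Spec_permutation_check_2 (list_1 : List Int) (list_2 : List Int) (out : Bool) : Prop := out = permutation_check_2_alt list_1 list_2
instance (list_1 : List Int) (list_2 : List Int) (out : Bool) : Decidable (Spec_permutation_check_2 list_1 list_2 out) := by unfold Spec_permutation_check_2; infer_instance

-- ===== CLAIM (what is proved, stated in full; the proofs are below) =====
def Claim_equal_permutation_check_2 : Prop := ∀ (list_1 : List Int) (list_2 : List Int), Dom_permutation_check_2 list_1 list_2 → Spec_permutation_check_2 list_1 list_2 (permutation_check_2 list_1 list_2)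

-- ===== LEMMAS AND PROOFS =====

-- the multiset of values occurring at mismatched positions
def pvMism (zs : List (Int × Int)) : List Int :=
  zs.flatMap (fun p => if p.1 ≠ p.2 then [p.1, p.2] else [])

theorem pv_getD_bump (d : PySem.Dict Int Int) (x y : Int) :
    (pvBump d x).getD y 0 = if y = x then d.getD x 0 + 1 else d.getD y 0 := by
  unfold pvBump
  by_cases hc : d.contains x = false
  · rw [if_pos hc, PySem.Dict.getD_insert]
    by_cases hyx : y = x
    · rw [if_pos hyx, if_pos hyx, PySem.Dict.getD_of_not_contains d 0 hc]
      omega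
    · rw [if_neg hyx, if_neg hyx]
  · rw [if_neg hc, PySem.Dict.getD_insert]

theorem pv_nodup_bump (d : PySem.Dict Int Int) (x : Int) (h : d.keys.Nodup) :
    (pvBump d x).keys.Nodup := by
  unfold pvBump
  split_ifs <;> exact PySem.Dict.nodup_keys_insert _ _ _ h

-- A's loop body over a pair
def pvStepA (d : PySem.Dict Int Int) (p : Int × Int) : PySem.Dict Int Int :=
  if p.1 ≠ p.2 then pvBump (pvBump d p.1) p.2 else d

theorem pv_nodup_foldA (zs : List (Int × Int)) (d : PySem.Dict Int Int) (h : d.keys.Nodup) :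
    (zs.foldl pvStepA d).keys.Nodup := by
  induction zs generalizing d with
  | nil => exact h
  | cons p zs ih =>
    refine ih _ ?_
    unfold pvStepA
    split_ifs with hp
    · exact pv_nodup_bump _ _ (pv_nodup_bump _ _ h)
    · exact h

-- A's dict holds exactly the occurrence counts over the mismatch multiset
theorem pv_countA (zs : List (Int × Int)) (d : PySem.Dict Int Int) (y : Int) :
    (zs.foldl pvStepA d).getD y 0 = d.getD y 0 + ((pvMism zs).count y : Int) := by
  induction zs generalizing d with
  | nil => simp [pvMism]
  | cons p zs ih =>
    rw [List.foldl_cons, ih]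
    unfold pvStepA pvMism
    by_cases hp : p.1 = p.2
    · simp [hp]
    · have hp' : p.1 ≠ p.2 := hp
      rw [if_pos hp']
      simp only [List.flatMap_cons, if_pos hp', List.count_append, pv_getD_bump]
      by_cases h2 : y = p.2 <;> by_cases h1 : y = p.1 <;>
        simp [h1, h2, List.count_cons] <;> omega

-- A's final values-scan says exactly "every key has an even count"
theorem pv_values_all_even (d : PySem.Dict Int Int) (hnd : d.keys.Nodup) :
    (d.values.all (fun item => PySem.Int.mod item 2 == 0) = true) ↔ ∀ y, 2 ∣ d.getD y 0 := by
  rw [PySem.Dict.values_eq_map_keys d hnd 0]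
  simp only [List.all_eq_true, List.mem_map, beq_iff_eq]
  constructor
  · intro hall y
    by_cases hc : d.contains y = true
    · have hk : y ∈ d.keys := (PySem.Dict.contains_iff_mem_keys d y).mp hc
      have := hall (d.getD y 0) ⟨y, hk, rfl⟩
      rwa [PySem.Int.mod_eq_zero_iff_dvd] at this
    · rw [PySem.Dict.getD_of_not_contains d 0 (by simpa using hc)]
      exact dvd_zero 2
  · intro hy x hx
    obtain ⟨k, _, rfl⟩ := hx
    rw [PySem.Int.mod_eq_zero_iff_dvd]
    exact hy k

-- on a ≤-sorted list, consecutive-pair equality says exactly "every count is even"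
theorem pv_paired_iff (l : List Int) (hs : l.Pairwise (· ≤ ·)) :
    pvPaired l = true ↔ ∀ y, 2 ∣ l.count y := by
  induction l using pvPaired.induct with
  | case1 => simp [pvPaired]
  | case2 a =>
    refine iff_of_false (by simp [pvPaired]) ?_
    intro h
    have hc := h a
    simp at hc
  | case3 a b t ih =>
    rw [List.pairwise_cons] at hs
    obtain ⟨hab, hs2⟩ := hs
    rw [List.pairwise_cons] at hs2
    obtain ⟨hbt, hst⟩ := hs2
    by_cases hne : a = b
    · subst hne
      simp only [pvPaired, beq_self_eq_true, Bool.true_and]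
      rw [ih hst]
      constructor
      · intro h y
        have := h y
        by_cases hy : y = a <;> simp [List.count_cons, hy] at this ⊢ <;> omega
      · intro h y
        have := h y
        by_cases hy : y = a <;> simp [List.count_cons, hy] at this ⊢ <;> omega
    · refine iff_of_false (by simp [pvPaired, hne]) ?_
      intro h
      have hc := h a
      have hlt : a < b := lt_of_le_of_ne (hab b List.mem_cons_self) hne
      have hnin : a ∉ b :: t := by
        intro hm
        rcases List.mem_cons.mp hm with h' | h'
        · exact absurd h' hne
        · exact absurd (hbt a h') (not_le.mpr hlt)
      rw [List.count_cons_self, List.count_eq_zero.mpr hnin] at hc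
      omega

-- ===== VERDICT (by name: the statement is the Claim_ definition above) =====
theorem permutation_check_2_spec : Claim_equal_permutation_check_2 := by
  intro list_1 list_2 _
  unfold Spec_permutation_check_2 permutation_check_2 permutation_check_2_alt
  by_cases hlen : list_1.length ≠ list_2.length
  · rw [if_pos hlen, if_pos hlen]
  · rw [if_neg hlen, if_neg hlen]
    have heq : list_1.length = list_2.length := by omega
    have hzlen : list_1.length = (list_1.zip list_2).length := by
      rw [List.length_zip, heq, Nat.min_self]
    have hlen' : PySem.List.len list_1 = PySem.List.len (list_1.zip list_2) := by
      rw [PySem.List.len_eq, PySem.List.len_eq, hzlen]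
    -- A's index loop is pvStepA folded over the zipped list
    have hcong : ∀ (acc : PySem.Dict Int Int),
        ∀ i ∈ PySem.List.pyRange 0 (PySem.List.len (list_1.zip list_2)),
        (if PySem.List.pyGetD list_1 i 0 ≠ PySem.List.pyGetD list_2 i 0 then
            pvBump (pvBump acc (PySem.List.pyGetD list_1 i 0)) (PySem.List.pyGetD list_2 i 0)
          else acc)
        = pvStepA acc (PySem.List.pyGetD (list_1.zip list_2) i (0, 0)) := by
      intro acc i hi
      rw [PySem.List.mem_pyRange_one, PySem.List.len_eq] at hi
      obtain ⟨h0, hilt⟩ := hi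
      have hnat : i.toNat < (list_1.zip list_2).length := by omega
      have h1n : i.toNat < list_1.length := by omega
      have h2n : i.toNat < list_2.length := by omega
      have e1 : PySem.List.pyGetD list_1 i 0 = list_1[i.toNat] := by
        rw [PySem.List.pyGetD_of_nonneg _ _ h0, List.getD_eq_getElem _ _ h1n]
      have e2 : PySem.List.pyGetD list_2 i 0 = list_2[i.toNat] := by
        rw [PySem.List.pyGetD_of_nonneg _ _ h0, List.getD_eq_getElem _ _ h2n]
      have ez : PySem.List.pyGetD (list_1.zip list_2) i (0, 0)
          = (list_1[i.toNat], list_2[i.toNat]) := by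
        rw [PySem.List.pyGetD_of_nonneg _ _ h0, List.getD_eq_getElem _ _ hnat,
          List.getElem_zip]
      rw [e1, e2, ez]
      rfl
    rw [hlen',
      PySem.List.foldl_congr_mem _ _
        (fun d i => pvStepA d (PySem.List.pyGetD (list_1.zip list_2) i (0, 0)))
        PySem.Dict.empty hcong,
      PySem.List.foldl_pyRange_zero_pyGetD (list_1.zip list_2) (0, 0) pvStepA PySem.Dict.empty]
    -- B's append loop builds the mismatch multiset
    have hB : ((list_1.zip list_2).foldl
        (fun acc p => if p.1 ≠ p.2 then acc ++ [p.1, p.2] else acc) ([] : List Int))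
        = pvMism (list_1.zip list_2) := by
      rw [PySem.List.foldl_congr_mem _ _
        (fun acc p => acc ++ (if p.1 ≠ p.2 then [p.1, p.2] else []))
        ([] : List Int) (by intro acc p _; by_cases h : p.1 ≠ p.2 <;> simp [h]),
        PySem.List.foldl_append_eq_flatMap]
      simp [pvMism]
    rw [hB, Bool.eq_iff_iff,
      pv_values_all_even _ (pv_nodup_foldA _ _ PySem.Dict.nodup_keys_empty),
      pv_paired_iff _ (by simpa using PySem.List.sorted_pairwise (pvMism (list_1.zip list_2)) (fun x => x))]
    have hcnt : ∀ y, (PySem.List.sorted (pvMism (list_1.zip list_2)) (fun x => x) false).count y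
        = (pvMism (list_1.zip list_2)).count y := fun y =>
      (PySem.List.sorted_perm (pvMism (list_1.zip list_2)) (fun x => x) false).count_eq y
    constructor
    · intro h y
      rw [hcnt y]
      have := h y
      rw [pv_countA, PySem.Dict.getD_empty] at this
      simp at this
      exact_mod_cast this
    · intro h y
      rw [pv_countA, PySem.Dict.getD_empty]
      have := h y
      rw [hcnt y] at this
      simp
      exact_mod_cast this
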